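-- pv_equiv track=rewrite | github.com/archana-06/CSA0605-DAA | prg 56 (SB-26).py | subsets_with_element
-- ===== SOURCE A (Python) =====
-- def subsets_with_element(S, x):
--     S.sort()  # Ensure lexicographical order
--     result = []
--
--     def backtrack(start, current_subset):
--         if x in current_subset:
--             result.append(current_subset[:])
--         for i in range(start, len(S)):
--             current_subset.append(S[i])
--             backtrack(i + 1, current_subset)
--             current_subset.pop()
--
--     backtrack(0, [])
--     return result
-- ===== SOURCE B (Python) =====
-- def subsets_with_element(S, x):
--     S.sort()  # same in-place sort as the original
--
--     def subs(lst):
--         # non-empty subsets of lst, in pre-order (lexicographic by index tuple)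
--         if not lst:
--             return []
--         head, rest = lst[0], lst[1:]
--         tail = subs(rest)
--         return [[head]] + [[head] + s for s in tail] + tail
--
--     return [c for c in subs(S) if x in c]
-- ===== Notes on version B (the rewrite author's own statement) =====
-- stated objective: alternative
-- what changed: Replaces the index-based mutating backtracking (append/recurse/pop with a shared current list and result accumulator) by a pure structural recursion on the sorted list that builds the full pre-order subset list, then filters it for subsets containing x.
import Mathlib
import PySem

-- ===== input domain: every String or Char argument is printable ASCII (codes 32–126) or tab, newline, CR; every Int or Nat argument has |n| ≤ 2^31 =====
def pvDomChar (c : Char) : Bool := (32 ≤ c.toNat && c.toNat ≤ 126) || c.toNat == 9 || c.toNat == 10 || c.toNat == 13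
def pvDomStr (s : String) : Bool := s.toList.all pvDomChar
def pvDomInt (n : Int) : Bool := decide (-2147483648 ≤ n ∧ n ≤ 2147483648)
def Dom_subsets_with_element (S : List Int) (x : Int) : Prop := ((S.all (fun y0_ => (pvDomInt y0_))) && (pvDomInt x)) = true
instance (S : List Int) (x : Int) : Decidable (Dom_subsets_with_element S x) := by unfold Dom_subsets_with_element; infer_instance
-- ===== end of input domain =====

-- B replaces mutating index-backtracking by a pure structural recursion building the pre-order
-- subset list, then filtering for subsets containing x ("alternative", same cost).
-- Note: both Pythons sort S in place (the equivalence proved here concerns the return value;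
-- both perform the same mutation).

-- ===== PORT A =====
-- backtrack(start, current) depends on S only through the suffix S[start:], so the port
-- recurses on that suffix; 'btKids' is the for-loop of backtrack, 'btA' the function body.
mutual
  -- body of backtrack: emit current if x ∈ current, then run the loop
  def btA (x : Int) (cur : List Int) (suffix : List Int) : List (List Int) :=
    (if x ∈ cur then [cur] else []) ++ btKids x cur suffix
  termination_by (suffix.length, 1)
  decreasing_by simp [Prod.lex_iff]
  -- the 'for i in range(start, len(S))' loop: append S[i], recurse with start = i+1, pop
  def btKids (x : Int) (cur : List Int) : List Int → List (List Int)
    | [] => []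
    | a :: l => btA x (cur ++ [a]) l ++ btKids x cur l
  termination_by suffix => (suffix.length, 0)
  decreasing_by all_goals (simp [Prod.lex_iff]; try omega)
end

def subsets_with_element (S : List Int) (x : Int) : List (List Int) :=
  btA x [] (PySem.List.sorted S (fun y => y) false)

-- ===== PORT B =====
-- subs(lst): non-empty subsets of lst in pre-order, by structural recursion
def subsB : List Int → List (List Int)
  | [] => []
  | a :: l => [a] :: (subsB l).map (fun s => a :: s) ++ subsB l

def subsets_with_element_alt (S : List Int) (x : Int) : List (List Int) :=
  (subsB (PySem.List.sorted S (fun y => y) false)).filter (fun c => x ∈ c)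

-- ===== PRECONDITION & SPEC =====
def Spec_subsets_with_element (S : List Int) (x : Int) (out : List (List Int)) : Prop := out = subsets_with_element_alt S x
instance (S : List Int) (x : Int) (out : List (List Int)) : Decidable (Spec_subsets_with_element S x out) := by unfold Spec_subsets_with_element; infer_instance

-- ===== CLAIM (what is proved, stated in full; the proofs are below) =====
def Claim_equal_subsets_with_element : Prop := ∀ (S : List Int) (x : Int), Dom_subsets_with_element S x → Spec_subsets_with_element S x (subsets_with_element S x)

-- ===== LEMMAS AND PROOFS =====

-- unfolding equations for the mutual well-founded definitions
theorem btA_def (x : Int) (cur l : List Int) :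
    btA x cur l = (if x ∈ cur then [cur] else []) ++ btKids x cur l := by
  rw [btA.eq_def]

theorem btKids_nil (x : Int) (cur : List Int) : btKids x cur [] = [] := by
  rw [btKids.eq_def]

theorem btKids_cons (x : Int) (cur a : _) (l : List Int) :
    btKids x cur (a :: l) = btA x (cur ++ [a]) l ++ btKids x cur l := by
  rw [btKids.eq_def]

-- the loop of A generates, rooted at cur, exactly cur ++ s for each non-empty subset s of the
-- suffix (in B's pre-order), filtered for membership of x
theorem btKids_eq_filter (x : Int) (l : List Int) : ∀ cur : List Int,
    btKids x cur l = ((subsB l).map (fun s => cur ++ s)).filter (fun c => x ∈ c) := by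
  induction l with
  | nil => intro cur; simp [btKids_nil, subsB]
  | cons a l ih =>
    intro cur
    simp only [btKids_cons, btA_def, subsB, List.map_cons, List.map_append, List.map_map,
      List.filter_cons, List.filter_append]
    rw [ih (cur ++ [a]), ih cur]
    have hmap : (subsB l).map ((fun s => cur ++ s) ∘ (fun s => a :: s))
        = (subsB l).map (fun s => (cur ++ [a]) ++ s) := by
      apply List.map_congr_left; intro s _; simp
    rw [hmap]
    by_cases hx : x ∈ cur ++ [a] <;> simp [hx]

theorem subsets_with_element_eq (S : List Int) (x : Int) :
    subsets_with_element S x = subsets_with_element_alt S x := by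
  unfold subsets_with_element subsets_with_element_alt
  rw [btA_def, btKids_eq_filter]
  simp

-- ===== VERDICT (by name: the statement is the Claim_ definition above) =====
theorem subsets_with_element_spec : Claim_equal_subsets_with_element := by
  intro S x _
  unfold Spec_subsets_with_element
  exact subsets_with_element_eq S x
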